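-- pv_equiv track=rewrite | github.com/ManuTorrado/FCEyN-IP | CMS3/tst_unir_diccionarios.py | unir_diccionarios
-- ===== SOURCE A (Python) =====
-- from typing import List
-- from typing import Dict
--
-- def unir_diccionarios(a_unir: List[Dict[str, str]]) -> Dict[str, List[str]]:
--     res: Dict[str, List[str]] = {}
--
--     for diccionario in a_unir:
--         for key in diccionario:
--             if (key in res):
--                 res[key].append(diccionario[key])
--             else:
--                 res[key] = [diccionario[key]]
--
--     return res
-- ===== SOURCE B (Python) =====
-- from typing import List
-- from typing import Dict
--
-- def unir_diccionarios(a_unir: List[Dict[str, str]]) -> Dict[str, List[str]]: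
--     claves = list(dict.fromkeys(k for d in a_unir for k in d))
--     return {k: [v for d in a_unir for kk, v in d.items() if kk == k] for k in claves}
-- ===== Notes on version B (the rewrite author's own statement) =====
-- stated objective: alternative
-- what changed: A streams every (key, value) pair once into an accumulator dict (append-or-insert); B transposes the traversal: it first computes the distinct keys in first-appearance order with dict.fromkeys and then builds the result by gathering each key's values across all dicts in a per-key pass.
import Mathlib
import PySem

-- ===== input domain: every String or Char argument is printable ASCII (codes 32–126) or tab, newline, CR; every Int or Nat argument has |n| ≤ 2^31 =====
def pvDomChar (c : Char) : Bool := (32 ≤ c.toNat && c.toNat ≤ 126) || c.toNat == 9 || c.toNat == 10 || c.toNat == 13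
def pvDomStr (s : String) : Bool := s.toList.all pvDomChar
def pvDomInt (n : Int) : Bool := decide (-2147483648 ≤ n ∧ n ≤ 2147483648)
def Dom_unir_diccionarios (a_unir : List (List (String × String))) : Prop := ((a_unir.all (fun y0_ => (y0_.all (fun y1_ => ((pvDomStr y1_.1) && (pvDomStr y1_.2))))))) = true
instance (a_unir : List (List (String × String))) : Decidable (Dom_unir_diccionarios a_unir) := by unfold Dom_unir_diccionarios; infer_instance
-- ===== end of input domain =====

-- B transposes A's traversal: it first computes the distinct keys in first-appearance order,
-- then gathers each key's values across all dicts (objective: alternative decomposition, not faster).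

-- ===== PORT A =====
-- A streams every (key, value) pair into one accumulator dict, appending to the
-- key's list if the key is present, else inserting a fresh one-element list.
def unir_diccionarios (a_unir : List (List (String × String))) : List (String × List String) :=
  (a_unir.foldl
    (fun res diccionario =>
      diccionario.foldl
        (fun res p =>
          if res.contains p.1 then
            res.modify p.1 [] (fun vs => vs ++ [p.2])   -- res[key].append(diccionario[key])
          else
            res.insert p.1 [p.2])                        -- res[key] = [diccionario[key]]
        res)
    (PySem.Dict.empty : PySem.Dict String (List String))).items

-- ===== PORT B =====
-- claves = list(dict.fromkeys(k for d in a_unir for k in d)); then a per-key gather.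
def unir_diccionarios_alt (a_unir : List (List (String × String))) : List (String × List String) :=
  let claves := PySem.List.dedup (a_unir.flatMap (fun d => d.map Prod.fst))
  claves.map (fun k =>
    (k, a_unir.flatMap (fun d => (d.filter (fun p => p.1 == k)).map Prod.snd)))

-- ===== PRECONDITION & SPEC =====
def Spec_unir_diccionarios (a_unir : List (List (String × String))) (out : List (String × List String)) : Prop := out = unir_diccionarios_alt a_unir
instance (a_unir : List (List (String × String))) (out : List (String × List String)) : Decidable (Spec_unir_diccionarios a_unir out) := by unfold Spec_unir_diccionarios; infer_instance

-- ===== CLAIM (what is proved, stated in full; the proofs are below) =====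
def Claim_equal_unir_diccionarios : Prop := ∀ (a_unir : List (List (String × String))), Dom_unir_diccionarios a_unir → Spec_unir_diccionarios a_unir (unir_diccionarios a_unir)

-- ===== LEMMAS AND PROOFS =====

-- A's two branches are both exactly `modify p.1 [] (· ++ [p.2])`.
theorem step_eq_modify (res : PySem.Dict String (List String)) (p : String × String) :
    (if res.contains p.1 then res.modify p.1 [] (fun vs => vs ++ [p.2])
     else res.insert p.1 [p.2])
      = res.modify p.1 [] (fun vs => vs ++ [p.2]) := by
  by_cases h : res.contains p.1
  · simp [h]
  · simp only [Bool.not_eq_true] at h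
    simp [h, PySem.Dict.modify, PySem.Dict.getD_of_not_contains _ _ h]

theorem unir_diccionarios_spec : Claim_equal_unir_diccionarios := by
  intro a_unir _
  show unir_diccionarios a_unir = unir_diccionarios_alt a_unir
  unfold unir_diccionarios unir_diccionarios_alt
  -- collapse A's double fold into a single fold over the flattened pair list
  simp only [step_eq_modify]
  rw [← List.foldl_flatten]
  set pairs := a_unir.flatten with hpairs
  set D := pairs.foldl (fun res p => res.modify p.1 [] (fun vs => vs ++ [p.2]))
      (PySem.Dict.empty : PySem.Dict String (List String)) with hD
  have hnodup : D.keys.Nodup := by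
    rw [hD]
    exact PySem.Dict.nodup_keys_foldl_modify_key pairs Prod.fst [] (fun _ p => (· ++ [p.2]))
      _ (by simp)
  have hkeys : D.keys = PySem.List.dedup (pairs.map Prod.fst) := by
    rw [hD, PySem.Dict.keys_foldl_modify_key pairs Prod.fst [] (fun _ p => (· ++ [p.2]))]
    simp [PySem.Set.update, PySem.Set.ofList_eq_foldl]
  rw [PySem.Dict.items_eq_map_keys D hnodup [], hkeys]
  have hkeys' : pairs.map Prod.fst = a_unir.flatMap (fun d => d.map Prod.fst) := by
    rw [hpairs]; simp [List.flatMap]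
  rw [hkeys']
  refine List.map_congr_left (fun k _ => ?_) 
  have hget : D.getD k [] = (pairs.filter (fun p => p.1 == k)).map Prod.snd := by
    rw [hD, PySem.Dict.getD_foldl_modify_append]
    simp
  rw [hget, hpairs]
  simp [List.flatMap, Function.comp_def]

-- ===== VERDICT (by name: the statement is the Claim_ definition above) =====
-- proved above as unir_diccionarios_spec
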